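-- pv_equiv track=rewrite | github.com/brgrd/watchtower | agent/ingest.py | _contains_positive
-- ===== SOURCE A (Python) =====
-- _NEGATION_PREFIXES = ("no ", "not ", "without ", "currently no ", "no available ")
--
-- def _contains_positive(blob: str, phrases: tuple) -> bool:
--     """Return True if a phrase appears in blob and is NOT immediately preceded
--     by a negation word (no, not, without, currently no).  Prevents 'no patch
--     available' from triggering the 'patch available' positive phrase."""
--     low = blob.lower()
--     for phrase in phrases:
--         start = 0
--         while True:
--             idx = low.find(phrase, start)
--             if idx == -1:
--                 break
--             prefix = low[max(0, idx - 16) : idx]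
--             if not any(prefix.endswith(neg) or prefix.endswith(neg.rstrip()) for neg in _NEGATION_PREFIXES):
--                 return True
--             start = idx + 1
--     return False
-- ===== SOURCE B (Python) =====
-- # Alternative: single left-to-right scan over every position of the lowered blob,
-- # testing "non-negated position that starts some phrase" directly, instead of a
-- # per-phrase find/advance loop with a windowed prefix check.
-- _NEGATION_PREFIXES = ("no ", "not ", "without ", "currently no ", "no available ")
--
-- _NEG_SUFFIXES = tuple(form for p in _NEGATION_PREFIXES for form in (p, p.rstrip()))
--
--
-- def _contains_positive(blob: str, phrases: tuple) -> bool: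
--     low = blob.lower()
--     phrases = tuple(phrases)
--     return any(
--         low.startswith(phrases, i) and not low.endswith(_NEG_SUFFIXES, 0, i)
--         for i in range(len(low) + 1)
--     )
-- ===== Notes on version B (the rewrite author's own statement) =====
-- stated objective: alternative
-- what changed: Replaces A's per-phrase find/advance loop with its 16-char windowed prefix check by a single scan over every position of the lowered blob, testing directly whether the position is non-negated (full-prefix endswith against a precomputed tuple of both negation forms) and starts some phrase.
import Mathlib
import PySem

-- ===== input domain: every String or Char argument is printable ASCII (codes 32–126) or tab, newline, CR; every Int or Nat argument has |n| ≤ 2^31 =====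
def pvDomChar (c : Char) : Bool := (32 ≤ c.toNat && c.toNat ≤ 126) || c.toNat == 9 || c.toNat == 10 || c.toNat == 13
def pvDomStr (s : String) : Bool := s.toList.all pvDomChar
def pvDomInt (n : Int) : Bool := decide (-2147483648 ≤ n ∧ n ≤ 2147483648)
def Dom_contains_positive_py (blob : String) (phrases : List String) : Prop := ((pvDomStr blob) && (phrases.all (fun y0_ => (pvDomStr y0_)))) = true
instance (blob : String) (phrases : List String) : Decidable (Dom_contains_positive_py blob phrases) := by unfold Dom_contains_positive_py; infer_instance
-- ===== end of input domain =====

-- B replaces A's per-phrase find/advance loop (with its 16-char windowed prefix check) by a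
-- single scan over every position of the lowered blob; alternative decomposition, similar cost.

-- ===== PORT A =====
def negationPrefixes : List String := ["no ", "not ", "without ", "currently no ", "no available "]

-- needed by aLoop's termination proof: find from a start past the end yields -1
theorem findFrom_of_len_lt (s sub : List Char) (k : Nat) (h : s.length < k) :
    PySem.Chars.findFrom s sub (k : Int) none = -1 := by
  simp only [PySem.Chars.findFrom]
  split_ifs <;> first | rfl | (exfalso; push_cast at *; omega)

-- A's 'while True' loop for one phrase, carrying the current 'start'
def aLoop (low phrase : List Char) (start : Nat) : Bool :=
  let idx := PySem.Chars.findFrom low phrase (start : Int) none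
  if h : idx = -1 then false
  else
    let pre := PySem.List.slice low (some (max 0 (idx - 16))) (some idx)
    if negationPrefixes.any (fun neg =>
        PySem.Chars.endswith pre neg.toList || PySem.Chars.endswith pre (PySem.Chars.rstrip neg.toList))
    then aLoop low phrase (idx.toNat + 1)
    else true
termination_by low.length + 1 - start
decreasing_by
  have hle : start ≤ low.length := by
    by_contra hgt
    exact h (findFrom_of_len_lt low phrase start (by omega))
  have hspec := PySem.Chars.findFrom_natCast_spec low phrase start hle h
  omega

def contains_positive_py (blob : String) (phrases : List String) : Bool :=
  let low := PySem.Chars.lower blob.toList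
  phrases.any (fun phrase => aLoop low phrase.toList 0)

-- ===== PORT B =====
def negPrefixesB : List String := ["no ", "not ", "without ", "currently no ", "no available "]

-- Source B's _NEG_SUFFIXES: both the space-terminated and rstrip-ed form of every prefix
def negSuffixes : List (List Char) :=
  negPrefixesB.flatMap (fun p => [p.toList, PySem.Chars.rstrip p.toList])

-- low.startswith(tuple, i) is ported as 'any' over the tuple on low.drop i, and
-- low.endswith(tuple, 0, i) as 'any' on low.take i: exact, since 0 ≤ i ≤ len(low) here.
def contains_positive_py_alt (blob : String) (phrases : List String) : Bool :=
  let low := PySem.Chars.lower blob.toList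
  (List.range (low.length + 1)).any (fun i =>
    phrases.any (fun p => PySem.Chars.startswith (low.drop i) p.toList) &&
    !(negSuffixes.any (fun n => PySem.Chars.endswith (low.take i) n)))

-- ===== PRECONDITION & SPEC =====
def Spec_contains_positive_py (blob : String) (phrases : List String) (out : Bool) : Prop := out = contains_positive_py_alt blob phrases
instance (blob : String) (phrases : List String) (out : Bool) : Decidable (Spec_contains_positive_py blob phrases out) := by unfold Spec_contains_positive_py; infer_instance

-- ===== CLAIM (what is proved, stated in full; the proofs are below) =====
def Claim_equal_contains_positive_py : Prop := ∀ (blob : String) (phrases : List String), Dom_contains_positive_py blob phrases → Spec_contains_positive_py blob phrases (contains_positive_py blob phrases)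

-- ===== LEMMAS AND PROOFS =====

-- "position i of low is negated", in B's formulation
def negatedAt (low : List Char) (i : Nat) : Bool :=
  negSuffixes.any (fun n => PySem.Chars.endswith (low.take i) n)

-- a suffix short enough to fit into a drop of the list is a suffix of that drop
theorem suffix_drop_of_suffix (x t : List Char) (m : Nat)
    (hx : x <:+ t) (hlen : x.length + m ≤ t.length) : x <:+ t.drop m := by
  obtain ⟨u, rfl⟩ := hx
  rw [List.drop_append_of_le_length (by simp at hlen ⊢; omega)]
  exact List.suffix_append _ _

-- the 16-char window sees exactly the suffixes of length ≤ 16 of the full prefix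
theorem endswith_window (low x : List Char) (i : Nat) (hi : i ≤ low.length) (hx : x.length ≤ 16) :
    PySem.Chars.endswith ((low.take i).drop (i - 16)) x = PySem.Chars.endswith (low.take i) x := by
  rw [Bool.eq_iff_iff, PySem.Chars.endswith_iff, PySem.Chars.endswith_iff]
  constructor
  · exact fun h => h.trans (List.drop_suffix _ _)
  · intro h
    exact suffix_drop_of_suffix x _ _ h (by have := h.length_le; simp at this ⊢; omega)

-- A's windowed prefix check at a position idx ≤ low.length equals B's full-prefix check
theorem window_eq_negatedAt (low : List Char) (idx : Int) (h0 : 0 ≤ idx)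
    (hlen : idx.toNat ≤ low.length) :
    negationPrefixes.any (fun neg =>
        PySem.Chars.endswith (PySem.List.slice low (some (max 0 (idx - 16))) (some idx)) neg.toList ||
        PySem.Chars.endswith (PySem.List.slice low (some (max 0 (idx - 16))) (some idx)) (PySem.Chars.rstrip neg.toList))
      = negatedAt low idx.toNat := by
  have hpre : PySem.List.slice low (some (max 0 (idx - 16))) (some idx)
      = (low.take idx.toNat).drop (idx.toNat - 16) := by
    have hmax : (max 0 (idx - 16)).toNat = idx.toNat - 16 := by
      rcases max_cases 0 (idx - 16) with ⟨h, h'⟩ | ⟨h, h'⟩ <;> omega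
    rw [PySem.List.slice_toNat low (le_max_left _ _) h0, List.drop_take, hmax]
  rw [hpre]
  have h16 : ∀ x ∈ negSuffixes, x.length ≤ 16 := by decide
  have h1 : negationPrefixes.any (fun neg =>
        PySem.Chars.endswith ((low.take idx.toNat).drop (idx.toNat - 16)) neg.toList ||
        PySem.Chars.endswith ((low.take idx.toNat).drop (idx.toNat - 16)) (PySem.Chars.rstrip neg.toList))
      = negSuffixes.any (fun n => PySem.Chars.endswith ((low.take idx.toNat).drop (idx.toNat - 16)) n) := by
    simp [negSuffixes, negPrefixesB, negationPrefixes, Bool.or_assoc]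
  rw [h1, negatedAt, Bool.eq_iff_iff, List.any_eq_true, List.any_eq_true]
  constructor
  · rintro ⟨x, hxm, hx⟩
    exact ⟨x, hxm, by rwa [endswith_window low x _ hlen (h16 x hxm)] at hx⟩
  · rintro ⟨x, hxm, hx⟩
    exact ⟨x, hxm, by rwa [endswith_window low x _ hlen (h16 x hxm)]⟩

-- find never points past the end of the string
theorem findFrom_natCast_le_len (s sub : List Char) (k : Nat) :
    PySem.Chars.findFrom s sub (k:Int) none ≤ s.length := by
  simp only [PySem.Chars.findFrom]
  rw [if_neg (show ¬((k:Int) < 0) by omega)]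
  split_ifs with h1 h2
  · omega
  · omega
  · have := PySem.Chars.find_le_length (List.drop (k:Int).toNat (List.take ((s.length:Int)).toNat s)) sub
    simp at this ⊢
    omega

-- characterisation of A's inner loop: true iff some non-negated occurrence at or after 'start'
theorem aLoop_iff (low phrase : List Char) (start : Nat) :
    aLoop low phrase start = true ↔
      ∃ i : Nat, start ≤ i ∧ i ≤ low.length ∧ phrase <+: low.drop i ∧ negatedAt low i = false := by
  fun_induction aLoop low phrase start with
  | case1 start idx h =>
    simp only [Bool.false_eq_true, false_iff]
    rintro ⟨i, hsi, hil, hocc, -⟩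
    by_cases hle : start ≤ low.length
    · rw [show idx = PySem.Chars.findFrom low phrase ↑start none from rfl,
        PySem.Chars.findFrom_natCast_eq_neg_one_iff low phrase start hle] at h
      apply h
      have hdr : low.drop i = (low.drop start).drop (i - start) := by
        rw [List.drop_drop]; congr 1; omega
      rw [hdr] at hocc
      exact hocc.isInfix.trans (List.drop_suffix _ _).isInfix
    · omega
  | case2 start idx h pre hcond ih =>
    have hle : start ≤ low.length := by
      by_contra hgt
      exact h (findFrom_of_len_lt low phrase start (by omega))
    have hspec := PySem.Chars.findFrom_natCast_spec low phrase start hle h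
    have hlen : idx ≤ low.length := findFrom_natCast_le_len low phrase start
    have h0 : (0:Int) ≤ idx := le_trans (Int.natCast_nonneg start) hspec.1
    have hneg_at : negatedAt low idx.toNat = true := by
      rw [← window_eq_negatedAt low idx h0 (by omega)]; exact hcond
    rw [ih]
    constructor
    · rintro ⟨i, hi, rest⟩
      exact ⟨i, by omega, rest⟩
    · rintro ⟨i, hsi, hil, hocc, hneg⟩
      refine ⟨i, ?_, hil, hocc, hneg⟩
      by_contra hlt
      rcases Nat.lt_or_ge i idx.toNat with hlt2 | hge
      · exact hspec.2.2 i hsi hlt2 hocc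
      · have heq : i = idx.toNat := by omega
        rw [heq, hneg_at] at hneg; cases hneg
  | case3 start idx h pre hcond =>
    have hle : start ≤ low.length := by
      by_contra hgt
      exact h (findFrom_of_len_lt low phrase start (by omega))
    have hspec := PySem.Chars.findFrom_natCast_spec low phrase start hle h
    have hlen : idx ≤ low.length := findFrom_natCast_le_len low phrase start
    have h0 : (0:Int) ≤ idx := le_trans (Int.natCast_nonneg start) hspec.1
    simp only [true_iff]
    refine ⟨idx.toNat, by omega, by omega, hspec.2.1, ?_⟩
    rw [← window_eq_negatedAt low idx h0 (by omega)]
    exact Bool.not_eq_true _ |>.mp (by exact fun hc => hcond hc)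

-- characterisation of B: true iff some non-negated position starts some phrase
theorem alt_iff (blob : String) (phrases : List String) :
    contains_positive_py_alt blob phrases = true ↔
      ∃ i : Nat, i ≤ (PySem.Chars.lower blob.toList).length ∧ negatedAt (PySem.Chars.lower blob.toList) i = false ∧
        ∃ p ∈ phrases, p.toList <+: (PySem.Chars.lower blob.toList).drop i := by
  simp only [contains_positive_py_alt, List.any_eq_true, List.mem_range, Bool.and_eq_true,
    Bool.not_eq_true', PySem.Chars.startswith_iff, negatedAt]
  constructor
  · rintro ⟨i, hi, ⟨p, hp, h⟩, hneg⟩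
    exact ⟨i, by omega, hneg, p, hp, h⟩
  · rintro ⟨i, hi, hneg, p, hp, h⟩
    exact ⟨i, by omega, ⟨p, hp, h⟩, hneg⟩

-- ===== VERDICT (by name: the statement is the Claim_ definition above) =====
theorem contains_positive_py_spec : Claim_equal_contains_positive_py := by
  intro blob phrases _
  unfold Spec_contains_positive_py contains_positive_py
  rw [Bool.eq_iff_iff]
  simp only [List.any_eq_true, aLoop_iff, alt_iff]
  constructor
  · rintro ⟨p, hp, i, -, hi, hocc, hneg⟩
    exact ⟨i, hi, hneg, p, hp, hocc⟩
  · rintro ⟨i, hi, hneg, p, hp, hocc⟩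
    exact ⟨p, hp, i, Nat.zero_le _, hi, hocc, hneg⟩
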